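-- pv_equiv track=rewrite | github.com/hhoow0093/Algorithm-Data-Structure | 01. Array & Strings/algo-map-io/02.review/04. Subsequence.py | solve
-- ===== SOURCE A (Python) =====
-- def solve(subsequence, string):
--     string_complement = list(string)
--     # remove subsequence from string
--     for i in range(0, len(subsequence)):
--         if subsequence[i] in string_complement:
--             string_complement.remove(subsequence[i])
--
--     # remove item in string complement to match with subsequence
--     string_check = list(string)
--     for item in string_complement:
--         string_check.remove(item)
--
--     # check if string_check is the same as list(subsequence)
--     if string_check == list(subsequence):
--         return True
--     else:
--         return False
-- ===== SOURCE B (Python) =====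
-- def solve(subsequence, string):
--     # Retained characters: for each character, drop its earliest surplus
--     # occurrences in `string` (surplus = occurrences beyond the number
--     # wanted by `subsequence`), then compare what remains to `subsequence`.
--     need = {}
--     for c in subsequence:
--         need[c] = need.get(c, 0) + 1
--     total = {}
--     for c in string:
--         total[c] = total.get(c, 0) + 1
--     kept = []
--     seen = {}
--     for c in string:
--         s = seen.get(c, 0) + 1
--         seen[c] = s
--         if total.get(c, 0) - s < need.get(c, 0):
--             kept.append(c)
--     return kept == list(subsequence)
-- ===== Notes on version B (the rewrite author's own statement) =====
-- stated objective: faster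
-- what changed: A repeatedly scans and mutates lists with `in`/remove (quadratic); B builds character-count dicts once and does a single forward pass over the string that drops each character's earliest surplus occurrences by rank, then compares the retained list to the subsequence.
import Mathlib
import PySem

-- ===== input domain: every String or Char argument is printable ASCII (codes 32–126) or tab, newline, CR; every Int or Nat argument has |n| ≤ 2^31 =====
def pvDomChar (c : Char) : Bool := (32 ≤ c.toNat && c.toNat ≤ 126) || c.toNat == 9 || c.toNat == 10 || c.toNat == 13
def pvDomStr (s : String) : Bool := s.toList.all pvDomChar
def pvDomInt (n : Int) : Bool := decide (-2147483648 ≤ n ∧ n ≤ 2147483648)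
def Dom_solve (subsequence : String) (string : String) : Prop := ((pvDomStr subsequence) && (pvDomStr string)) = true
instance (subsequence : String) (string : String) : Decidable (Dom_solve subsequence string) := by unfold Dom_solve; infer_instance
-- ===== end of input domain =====

-- B replaces A's repeated remove/`in` scans by counting dicts and one forward pass that drops
-- each character's earliest surplus occurrences by rank (objective: faster).

-- ===== PORT A =====
-- literal port of A; in the second loop Python's list.remove always succeeds (string_complement
-- is a sub-multiset of string, proved below), so the `.getD chk` total-form guard is unreachable
def solve (subsequence : String) (string : String) : Bool :=
  ((PySem.List.pyRange 0 (PySem.List.len subsequence.toList) 1).foldl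
      (fun comp i =>
        if comp.contains (PySem.List.pyGetD subsequence.toList i ' ') then
          (PySem.List.remove? comp (PySem.List.pyGetD subsequence.toList i ' ')).getD comp
        else comp)
      string.toList).foldl
    (fun chk item => (PySem.List.remove? chk item).getD chk)
    string.toList
  == subsequence.toList

-- ===== PORT B =====
def solve_alt (subsequence : String) (string : String) : Bool :=
  let need := subsequence.toList.foldl
    (fun (d : PySem.Dict Char Int) c => d.insert c (d.getD c 0 + 1)) PySem.Dict.empty
  let total := string.toList.foldl
    (fun (d : PySem.Dict Char Int) c => d.insert c (d.getD c 0 + 1)) PySem.Dict.empty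
  (string.toList.foldl
      (fun (st : PySem.Dict Char Int × List Char) c =>
        let s := st.1.getD c 0 + 1
        (st.1.insert c s,
         if total.getD c 0 - s < need.getD c 0 then st.2 ++ [c] else st.2))
      (PySem.Dict.empty, [])).2
  == subsequence.toList

-- ===== PRECONDITION & SPEC =====
def Spec_solve (subsequence : String) (string : String) (out : Bool) : Prop := out = solve_alt subsequence string
instance (subsequence : String) (string : String) (out : Bool) : Decidable (Spec_solve subsequence string out) := by unfold Spec_solve; infer_instance

-- ===== CLAIM (what is proved, stated in full; the proofs are below) =====
def Claim_equal_solve : Prop := ∀ (subsequence : String) (string : String), Dom_solve subsequence string → Spec_solve subsequence string (solve subsequence string)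

-- ===== LEMMAS AND PROOFS =====

-- drop, for each character c, the FIRST m c occurrences of c
def pvDropFirsts : List Char → (Char → Nat) → List Char
  | [], _ => []
  | a :: s, m =>
      if m a > 0 then pvDropFirsts s (fun c => if c = a then m c - 1 else m c)
      else a :: pvDropFirsts s m

-- keep, for each character c, the LAST k c occurrences of c
def pvKeepLast : List Char → (Char → Nat) → List Char
  | [], _ => []
  | a :: s, k => if s.count a < k a then a :: pvKeepLast s k else pvKeepLast s k

theorem pvCountFoldA (t : List Char) (comp : List Char) (c : Char) :
    (t.foldl (fun comp c => if comp.contains c then (PySem.List.remove? comp c).getD comp else comp) comp).count c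
      = comp.count c - min (comp.count c) (t.count c) := by
  induction t generalizing comp with
  | nil => simp
  | cons d t ih =>
      simp only [List.foldl_cons]
      by_cases hd : comp.contains d
      · have hmem : d ∈ comp := by simpa using hd
        rw [if_pos hd, PySem.List.remove?_eq_some_erase comp d hmem, Option.getD_some, ih]
        have h3 : 0 < comp.count d := List.count_pos_iff.mpr hmem
        by_cases hcd : c = d
        · subst hcd
          rw [List.count_erase_self, List.count_cons_self]
          omega
        · rw [List.count_erase_of_ne hcd, List.count_cons_of_ne (fun h => hcd h.symm)]
      · rw [if_neg hd, ih]
        have hmem : d ∉ comp := by simpa using hd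
        have h0 : comp.count d = 0 := by simpa [List.count_eq_zero] using hmem
        by_cases hcd : c = d
        · subst hcd
          rw [List.count_cons_self]
          omega
        · rw [List.count_cons_of_ne (fun h => hcd h.symm)]

theorem pvDropFirsts_zero (s : List Char) : pvDropFirsts s (fun _ => 0) = s := by
  induction s with
  | nil => rfl
  | cons a s ih => simp only [pvDropFirsts]; rw [if_neg (by omega), ih]

theorem pvDropFirsts_erase (s : List Char) (c : Char) (m : Char → Nat) (hc : c ∈ s) :
    pvDropFirsts (s.erase c) m = pvDropFirsts s (fun d => if d = c then m d + 1 else m d) := by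
  induction s generalizing m with
  | nil => cases hc
  | cons a s ih =>
      by_cases hac : a = c
      · subst hac
        rw [List.erase_cons_head]
        simp only [pvDropFirsts]
        rw [if_pos (by simp)]
        have hf : (fun d => if d = a then (if d = a then m d + 1 else m d) - 1 else if d = a then m d + 1 else m d) = m := by
          funext d; by_cases hda : d = a <;> simp [hda]
        rw [hf]
      · have hc' : c ∈ s := by cases hc with | head => exact absurd rfl hac | tail _ h => exact h
        rw [List.erase_cons_tail (by simpa using hac)]
        simp only [pvDropFirsts, if_neg hac]
        by_cases hma : m a > 0
        · rw [if_pos hma, if_pos hma, ih _ hc']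
          congr 1
          funext d
          by_cases hdc : d = c
          · subst hdc
            have hca : ¬ d = a := fun h => hac h.symm
            simp [hca]
          · by_cases hda : d = a
            · subst hda
              simp [hac]
            · simp [hda, hdc]
        · rw [if_neg hma, if_neg hma, ih m hc']

theorem pvFoldRemove (r : List Char) (s : List Char)
    (h : ∀ c, r.count c ≤ s.count c) :
    r.foldl (fun chk item => (PySem.List.remove? chk item).getD chk) s
      = pvDropFirsts s (fun c => r.count c) := by
  induction r generalizing s with
  | nil =>
      simp only [List.foldl_nil, List.count_nil]
      exact (pvDropFirsts_zero s).symm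
  | cons c r ih =>
      have hcs : c ∈ s := by
        have hc := h c
        rw [List.count_cons_self] at hc
        exact List.count_pos_iff.mp (by omega)
      simp only [List.foldl_cons]
      rw [PySem.List.remove?_eq_some_erase s c hcs, Option.getD_some]
      rw [ih (s.erase c) (by
        intro d
        have hd := h d
        by_cases hdc : d = c
        · subst hdc
          rw [List.count_cons_self] at hd
          rw [List.count_erase_self]
          omega
        · rw [List.count_cons_of_ne (fun h => hdc h.symm)] at hd
          rw [List.count_erase_of_ne hdc]
          omega)]
      rw [pvDropFirsts_erase s c _ hcs]
      congr 1
      funext d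
      by_cases hdc : d = c
      · subst hdc
        simp [List.count_cons_self]
      · simp [hdc, List.count_cons_of_ne (fun h => hdc h.symm)]

theorem pvKeepLast_congr (s : List Char) (k k' : Char → Nat)
    (h : ∀ c, min (k c) (s.count c) = min (k' c) (s.count c)) :
    pvKeepLast s k = pvKeepLast s k' := by
  induction s with
  | nil => rfl
  | cons a s ih =>
      simp only [pvKeepLast]
      have ha := h a
      rw [List.count_cons_self] at ha
      have hcond : (s.count a < k a) ↔ (s.count a < k' a) := by omega
      have ih' : pvKeepLast s k = pvKeepLast s k' := by
        apply ih
        intro c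
        have hc := h c
        by_cases hca : c = a
        · subst hca
          rw [List.count_cons_self] at hc
          omega
        · rw [List.count_cons_of_ne (fun h => hca h.symm)] at hc
          omega
      by_cases hlt : s.count a < k a
      · rw [if_pos hlt, if_pos (hcond.mp hlt), ih']
      · rw [if_neg hlt, if_neg (fun hx => hlt (hcond.mpr hx)), ih']

theorem pvDropFirsts_eq_keepLast (s : List Char) (m : Char → Nat)
    (h : ∀ c, m c ≤ s.count c) :
    pvDropFirsts s m = pvKeepLast s (fun c => s.count c - m c) := by
  induction s generalizing m with
  | nil => rfl
  | cons a s ih =>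
      simp only [pvDropFirsts, pvKeepLast]
      have hma' := h a
      rw [List.count_cons_self] at hma'
      have hcnt : (a :: s).count a = s.count a + 1 := by rw [List.count_cons_self]
      by_cases hma : m a > 0
      · rw [if_pos hma, if_neg (by rw [hcnt]; omega)]
        rw [ih _ (by
          intro c
          have hc := h c
          by_cases hca : c = a
          · subst hca
            rw [List.count_cons_self] at hc
            simp
            omega
          · rw [List.count_cons_of_ne (fun h => hca h.symm)] at hc
            simp [hca]
            omega)]
        apply pvKeepLast_congr
        intro c
        by_cases hca : c = a
        · subst hca
          rw [hcnt]
          simp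
          omega
        · rw [List.count_cons_of_ne (fun h => hca h.symm)]
          simp [hca]
      · have hm0 : m a = 0 := by omega
        rw [if_neg hma, if_pos (by rw [hcnt]; omega)]
        congr 1
        rw [ih m (by
          intro c
          have hc := h c
          by_cases hca : c = a
          · subst hca; omega
          · rw [List.count_cons_of_ne (fun h => hca h.symm)] at hc; omega)]
        apply pvKeepLast_congr
        intro c
        by_cases hca : c = a
        · subst hca
          rw [hcnt, hm0]
          omega
        · rw [List.count_cons_of_ne (fun h => hca h.symm)]

-- B's forward pass computes pvKeepLast: the kept occurrences of c are exactly those of rank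
-- above tot c - need c, i.e. with fewer than need c occurrences of c after them
theorem pvBLoop (l : List Char) (need tot g : Char → Nat)
    (needD totD seenD : PySem.Dict Char Int) (acc : List Char)
    (hneed : ∀ c, needD.getD c 0 = (need c : Int))
    (htot : ∀ c, totD.getD c 0 = (tot c : Int))
    (hseen : ∀ c, seenD.getD c 0 = (g c : Int))
    (hsum : ∀ c, tot c = g c + l.count c) :
    (l.foldl
        (fun (st : PySem.Dict Char Int × List Char) c =>
          (st.1.insert c (st.1.getD c 0 + 1),
           if totD.getD c 0 - (st.1.getD c 0 + 1) < needD.getD c 0 then st.2 ++ [c] else st.2))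
        (seenD, acc)).2
      = acc ++ pvKeepLast l need := by
  induction l generalizing g seenD acc with
  | nil => simp [pvKeepLast]
  | cons c l ih =>
      simp only [List.foldl_cons, pvKeepLast]
      have hsumc := hsum c
      rw [List.count_cons_self] at hsumc
      have hcond : (totD.getD c 0 - (seenD.getD c 0 + 1) < needD.getD c 0) ↔ (l.count c < need c) := by
        rw [htot c, hseen c, hneed c]
        omega
      have hrec : ∀ acc', (l.foldl
          (fun (st : PySem.Dict Char Int × List Char) c =>
            (st.1.insert c (st.1.getD c 0 + 1),
             if totD.getD c 0 - (st.1.getD c 0 + 1) < needD.getD c 0 then st.2 ++ [c] else st.2))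
          (seenD.insert c (seenD.getD c 0 + 1), acc')).2 = acc' ++ pvKeepLast l need := by
        intro acc'
        apply ih (fun x => if x = c then g x + 1 else g x)
        · intro x
          rw [PySem.Dict.getD_insert]
          by_cases hxc : x = c
          · rw [if_pos hxc, if_pos hxc, hxc, hseen c]
            push_cast
            ring
          · rw [if_neg hxc, if_neg hxc]
            exact hseen x
        · intro x
          have hx := hsum x
          by_cases hxc : x = c
          · rw [if_pos hxc, hxc]
            rw [hxc, List.count_cons_self] at hx
            omega
          · rw [if_neg hxc]
            rw [List.count_cons_of_ne (fun h => hxc h.symm)] at hx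
            exact hx
      by_cases hc : l.count c < need c
      · rw [if_pos (hcond.mpr hc), if_pos hc]
        rw [hrec (acc ++ [c])]
        simp
      · rw [if_neg (fun hx => hc (hcond.mp hx)), if_neg hc]
        rw [hrec acc]

-- A's two removal loops compute exactly "keep the last (count in subsequence) occurrences"
theorem pvCheckEq (t s : List Char) :
    (t.foldl (fun comp c => if comp.contains c then (PySem.List.remove? comp c).getD comp else comp) s).foldl
        (fun chk item => (PySem.List.remove? chk item).getD chk) s
      = pvKeepLast s (fun c => t.count c) := by
  have hcomp : ∀ c,
      (t.foldl (fun comp c => if comp.contains c then (PySem.List.remove? comp c).getD comp else comp) s).count c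
        = s.count c - min (s.count c) (t.count c) := fun c => pvCountFoldA t s c
  rw [pvFoldRemove _ s (fun c => by rw [hcomp c]; omega)]
  rw [pvDropFirsts_eq_keepLast s _ (fun c => by rw [hcomp c]; omega)]
  apply pvKeepLast_congr
  intro c
  rw [hcomp c]
  omega

theorem pvSolveA (subsequence string : String) :
    solve subsequence string
      = (pvKeepLast string.toList (fun c => subsequence.toList.count c)
          == subsequence.toList) := by
  unfold solve
  rw [PySem.List.foldl_pyRange_zero_pyGetD subsequence.toList ' '
        (fun comp c => if comp.contains c then (PySem.List.remove? comp c).getD comp else comp)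
        string.toList]
  rw [pvCheckEq]

theorem pvSolveB (subsequence string : String) :
    solve_alt subsequence string
      = (pvKeepLast string.toList (fun c => subsequence.toList.count c)
          == subsequence.toList) := by
  unfold solve_alt
  simp only [PySem.Dict.foldl_insert_getD_add_one_eq_counter]
  have h := pvBLoop string.toList (fun c => subsequence.toList.count c)
        (fun c => string.toList.count c) (fun _ => 0)
        (PySem.Dict.counter subsequence.toList) (PySem.Dict.counter string.toList) PySem.Dict.empty []
        (fun c => by rw [PySem.Dict.getD_counter])
        (fun c => by rw [PySem.Dict.getD_counter])
        (fun c => by simp [PySem.Dict.getD, PySem.Dict.get?, PySem.Dict.empty])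
        (fun c => by simp)
  rw [List.nil_append] at h
  exact congrArg (fun l => l == subsequence.toList) h

-- ===== VERDICT (by name: the statement is the Claim_ definition above) =====
theorem solve_spec : Claim_equal_solve := by
  intro subsequence string _
  unfold Spec_solve
  rw [pvSolveA, pvSolveB]
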